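-- pv_equiv track=rewrite | github.com/AbVal/evohyperband | hyperband/evo_search.py | dict_from_param_list
-- ===== SOURCE A (Python) =====
-- def dict_from_param_list(param_list):
--     dic = {}
--     for params in param_list:
--         for key in params:
--             if key not in dic:
--                 dic[key] = []
--             dic[key].append(params[key])
--     return dic
-- ===== SOURCE B (Python) =====
-- def dict_from_param_list(param_list):
--     # transpose: ordered union of keys first, then per-key collection across the dicts
--     keys = list(dict.fromkeys(key for params in param_list for key in params))
--     return {key: [params[key] for params in param_list if key in params] for key in keys}
-- ===== Notes on version B (the rewrite author's own statement) =====
-- stated objective: alternative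
-- what changed: A builds the result dict in one flat pass, appending each value as it scans; B transposes: it first computes the ordered union of all keys, then builds each key's value list by scanning param_list and collecting params[key] from every dict that contains the key.
import Mathlib
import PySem

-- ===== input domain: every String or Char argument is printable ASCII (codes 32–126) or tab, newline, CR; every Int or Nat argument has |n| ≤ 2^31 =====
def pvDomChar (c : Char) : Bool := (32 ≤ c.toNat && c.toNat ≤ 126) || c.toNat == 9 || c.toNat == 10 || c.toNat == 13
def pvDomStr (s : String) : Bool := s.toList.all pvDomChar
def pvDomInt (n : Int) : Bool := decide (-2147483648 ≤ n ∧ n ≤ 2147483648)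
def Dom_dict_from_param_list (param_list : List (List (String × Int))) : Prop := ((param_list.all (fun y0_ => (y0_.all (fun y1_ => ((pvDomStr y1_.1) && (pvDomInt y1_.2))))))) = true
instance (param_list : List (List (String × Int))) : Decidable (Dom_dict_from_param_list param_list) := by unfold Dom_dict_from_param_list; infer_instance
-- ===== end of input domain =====

-- B replaces A's one-pass dict-building loop by a transpose (ordered union of keys first,
-- then a per-key collection across the dicts); alternative decomposition, similar cost.


-- ===== PORT A =====
-- 'if key not in dic: dic[key] = []' followed by 'dic[key].append(v)' is
-- dic[key] = dic.get(key, []) + [v], i.e. Dict.modify with default [].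
def dict_from_param_list (param_list : List (List (String × Int))) : List (String × List Int) :=
  (param_list.foldl
    (fun dic params =>
      params.foldl (fun dic p => PySem.Dict.modify dic p.1 [] (fun xs => xs ++ [p.2])) dic)
    PySem.Dict.empty).items

-- ===== PORT B =====
def dict_from_param_list_alt (param_list : List (List (String × Int))) : List (String × List Int) :=
  let keys := PySem.List.dedup (param_list.flatMap (fun params => params.map Prod.fst))
  keys.map (fun key =>
    (key, param_list.filterMap (fun params => PySem.Dict.get? (PySem.Dict.mk params) key)))

-- ===== PRECONDITION & SPEC =====
-- Pre_ requires each inner association list to have pairwise-distinct keys: a Python dict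
-- cannot hold duplicate keys, so a list with duplicates encodes no actual input of A.
def Pre_dict_from_param_list (param_list : List (List (String × Int))) : Prop :=
  ∀ params ∈ param_list, (params.map Prod.fst).Nodup
instance (param_list : List (List (String × Int))) : Decidable (Pre_dict_from_param_list param_list) := by unfold Pre_dict_from_param_list; infer_instance

def pvWitness_dict_from_param_list : (List (List (String × Int))) :=
  [[("a", 1), ("b", 2)], [("a", 3)]]

def Spec_dict_from_param_list (param_list : List (List (String × Int))) (out : List (String × List Int)) : Prop := out = dict_from_param_list_alt param_list
instance (param_list : List (List (String × Int))) (out : List (String × List Int)) : Decidable (Spec_dict_from_param_list param_list out) := by unfold Spec_dict_from_param_list; infer_instance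

-- ===== CLAIM (what is proved, stated in full; the proofs are below) =====
def Claim_equal_dict_from_param_list : Prop := ∀ (param_list : List (List (String × Int))), Dom_dict_from_param_list param_list → Pre_dict_from_param_list param_list → Spec_dict_from_param_list param_list (dict_from_param_list param_list)

-- ===== LEMMAS AND PROOFS =====

-- A's result characterized over the flattened pair list.
theorem dict_from_param_list_charA (param_list : List (List (String × Int))) :
    dict_from_param_list param_list =
      (PySem.List.dedup ((param_list.flatMap (fun params => params)).map Prod.fst)).map
        (fun k => (k, ((param_list.flatMap (fun params => params)).filter
            (fun q => q.1 == k)).map (fun q => q.2))) := by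
  unfold dict_from_param_list
  rw [← List.foldl_flatMap]
  set L := param_list.flatMap (fun params => params) with hL
  have hnd : (L.foldl (fun d p => PySem.Dict.modify d p.1 [] (fun xs => xs ++ [p.2]))
      PySem.Dict.empty).keys.Nodup := by
    have := PySem.Dict.nodup_keys_foldl_modify_key L Prod.fst []
      (fun d p => (fun xs => xs ++ [p.2])) PySem.Dict.empty (by simp)
    simpa using this
  rw [PySem.Dict.items_eq_map_keys _ hnd ([] : List Int)]
  have hkeys : (L.foldl (fun d p => PySem.Dict.modify d p.1 [] (fun xs => xs ++ [p.2]))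
      PySem.Dict.empty).keys = PySem.List.dedup (L.map Prod.fst) := by
    have := PySem.Dict.keys_foldl_modify_key L Prod.fst []
      (fun d p => (fun xs => xs ++ [p.2])) PySem.Dict.empty
    simpa [PySem.Set.update_nil_left] using this
  rw [hkeys]
  refine List.map_congr_left (fun k _ => ?_)
  have := PySem.Dict.getD_foldl_modify_append L PySem.Dict.empty k
  simp only [PySem.Dict.getD_empty, List.nil_append] at this
  simp [this]

-- On a duplicate-free association list, filtering for a key yields exactly the first-match lookup.
theorem filter_eq_get_toList (p : List (String × Int)) (k : String)
    (h : (p.map Prod.fst).Nodup) :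
    ((p.filter (fun q => q.1 == k)).map (fun q => q.2)) =
      (PySem.Dict.get? (PySem.Dict.mk p) k).toList := by
  induction p with
  | nil => simp [PySem.Dict.get?]
  | cons a rest ih =>
    simp only [List.map_cons, List.nodup_cons] at h
    rw [PySem.Dict.get?_mk_cons]
    by_cases hk : a.1 = k
    · have hrest : rest.filter (fun q => q.1 == k) = [] := by
        refine List.filter_eq_nil_iff.mpr (fun q hq => ?_)
        subst hk
        simp only [beq_iff_eq]
        exact fun he => h.1 (he ▸ List.mem_map_of_mem hq)
      simp [hk, hrest]
    · have hbk : (a.1 == k) = false := beq_eq_false_iff_ne.mpr hk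
      simp only [List.filter_cons, hbk, Bool.false_eq_true, if_false]
      exact ih h.2

-- ===== VERDICT (by name: the statement is the Claim_ definition above) =====
theorem dict_from_param_list_spec : Claim_equal_dict_from_param_list := by
  intro pl _ hpre
  unfold Spec_dict_from_param_list dict_from_param_list_alt
  rw [dict_from_param_list_charA]
  rw [List.map_flatMap]
  refine List.map_congr_left (fun k _ => ?_)
  refine Prod.ext rfl ?_
  simp only
  rw [List.filter_flatMap, List.map_flatMap, List.filterMap_eq_flatMap_toList]
  exact List.flatMap_congr (fun p hp => filter_eq_get_toList p k (hpre p hp))
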